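-- pv_equiv track=rewrite | github.com/harshittiwari/GoogleFoobar | dont_mind_the_gap2.py | answer
-- ===== SOURCE A (Python) =====
-- from itertools import product
--
-- class Node:
--     def __init__(self, id):
--         self.id = id
--         self.transitions = {}
--         self.target_cache = {}
--
--     def add_transition(self, transition, target):
--         self.transitions[transition] = target
--
--     def get_target_after(self, path, skip):
--         path_lead_to = self.target_cache.setdefault(skip, {})
--         try:
--             return path_lead_to[path]
--         except KeyError:
--             if path:
--                 # Get next node and handle "removed" one if any
--                 transition = path[0]
--                 next_node = self.transitions[transition]
--                 if next_node is skip: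
--                     if next_node.transitions[transition] is next_node:
--                         next_node = self
--                     else:
--                         next_node = next_node.transitions[transition]
--                 path_lead_to[path] = next_node.get_target_after(path[1:], skip)
--             else:
--                 # No more transitions, we're done
--                 path_lead_to[path] = self
--             return path_lead_to[path]
--
-- def allPossiiblePaths(num_nodes, num_transitions):
--     for i in range(1, num_nodes + 1):
--         for p in product(range(num_transitions), repeat=i):
--             yield p
--
-- def allSatisy(automata, path, skip):
--     reference_node = automata[0]
--     if reference_node is skip:
--         reference_node = automata[1]
--     ending = reference_node.get_target_after(path, skip)
--     return all(ending == node.get_target_after(path, skip)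
--                for node in automata if node is not skip)
--
-- def pathPossible(automata, try_remove=None):
--     num_nodes = len(automata)
--     num_transitions = len(automata[0].transitions)
--     return any(allSatisy(automata, path, try_remove)
--                for path in allPossiiblePaths(num_nodes, num_transitions))
--
-- def answer(subway):
--     nodes = [Node(i) for i in range(len(subway))]
--     for node, transitions in zip(nodes, subway):
--         for transition, next_node_id in enumerate(transitions):
--             node.add_transition(transition, nodes[next_node_id])
--
--     if pathPossible(nodes):
--         return -1
--
--     for node in nodes:
--         if pathPossible(nodes, try_remove=node):
--             return node.id
--
--     return -2
-- ===== SOURCE B (Python) =====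
-- def answer(subway):
--     # Subset simulation: instead of enumerating every transition path and comparing
--     # each node's endpoint, track the set of possible current nodes and shrink it.
--     n = len(subway)
--     m = len(subway[0])
--     ids = list(range(n))
--     trans = [[ids[v] for v in row] for row in subway]
--
--     def eff(node, t, removed):
--         nxt = trans[node][t]
--         if nxt == removed:
--             red = trans[removed][t]
--             nxt = node if red == removed else red
--         return nxt
--
--     def synchronizable(removed):
--         frontier = {frozenset(i for i in ids if i != removed)}
--         for _ in range(n):
--             frontier = {frozenset(eff(v, t, removed) for v in S)
--                         for S in frontier for t in range(m)}
--             if any(len(S) == 1 for S in frontier):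
--                 return True
--         return False
--
--     if synchronizable(None):
--         return -1
--     for i in ids:
--         if synchronizable(i):
--             return i
--     return -2
-- ===== Notes on version B (the rewrite author's own statement) =====
-- stated objective: alternative
-- what changed: A enumerates every transition path of length 1..n and compares each node's endpoint per path; B runs a breadth-first subset simulation, mapping the deduplicated set of possible current nodes forward one symbol at a time and checking for a singleton.
-- outside the precondition, e.g. on answer([[2, 0, 1], [2], [2, 0, 2]]): A returns -1, B raises IndexError
import Mathlib
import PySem

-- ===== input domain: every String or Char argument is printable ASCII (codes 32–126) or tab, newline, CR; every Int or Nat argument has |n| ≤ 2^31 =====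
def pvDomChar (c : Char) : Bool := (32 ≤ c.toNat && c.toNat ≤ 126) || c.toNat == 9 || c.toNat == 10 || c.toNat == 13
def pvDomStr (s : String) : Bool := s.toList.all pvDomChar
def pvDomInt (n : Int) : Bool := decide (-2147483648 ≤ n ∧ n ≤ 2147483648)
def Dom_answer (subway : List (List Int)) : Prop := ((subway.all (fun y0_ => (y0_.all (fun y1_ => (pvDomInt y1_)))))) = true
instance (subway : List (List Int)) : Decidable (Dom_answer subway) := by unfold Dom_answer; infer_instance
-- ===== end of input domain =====

-- B replaces A's enumeration of all transition paths (comparing every node's endpoint per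
-- path) by a breadth-first subset simulation that tracks the set of possible current nodes.

-- ===== PORT A =====
-- Python `nodes[next_node_id]`: a negative in-range id wraps; out of range (excluded by
-- Pre_) Python raises IndexError, here the value is junk.
def pvResolve (n : Nat) (v : Int) : Nat := (if v < 0 then v + (n : Int) else v).toNat

-- one step of Node.get_target_after: follow transitions[t], with the skip redirection
def stepA (sub : List (List Int)) (skip : Option Nat) (cur t : Nat) : Nat :=
  let nxt := pvResolve sub.length ((sub.getD cur []).getD t 0)
  match skip with
  | none => nxt
  | some s =>
      if nxt = s then
        let nn := pvResolve sub.length ((sub.getD s []).getD t 0)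
        if nn = s then cur else nn
      else nxt

-- Node.get_target_after (the memoisation cache dropped: it is pure)
def tgtA (sub : List (List Int)) (skip : Option Nat) (cur : Nat) (p : List Nat) : Nat :=
  p.foldl (stepA sub skip) cur

-- allSatisy: `node is not skip` filter written as a disjunct inside `all`
def allSatA (sub : List (List Int)) (skip : Option Nat) (p : List Nat) : Bool :=
  let ref : Nat := if skip == some 0 then 1 else 0
  let ending := tgtA sub skip ref p
  (List.range sub.length).all (fun q => skip == some q || tgtA sub skip q p == ending)

-- product(range m, repeat = i)
def tuplesA (m : Nat) : Nat → List (List Nat)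
  | 0 => [[]]
  | i + 1 => (tuplesA m i).flatMap (fun p => (List.range m).map (fun t => p ++ [t]))

-- pathPossible: any path of length 1..n (range(1, n+1) written as i+1 over range n)
def pathPossibleA (sub : List (List Int)) (skip : Option Nat) : Bool :=
  (List.range sub.length).any
    (fun i => (tuplesA ((sub.headD []).length) (i + 1)).any (allSatA sub skip))

def answerLoopA (sub : List (List Int)) : List Nat → Int
  | [] => -2
  | i :: rest => if pathPossibleA sub (some i) then (i : Int) else answerLoopA sub rest

def answer (subway : List (List Int)) : Int :=
  if pathPossibleA subway none then -1 else answerLoopA subway (List.range subway.length)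

-- ===== PORT B =====
-- trans = [[ids[v] for v in row] for row in subway]  (ids[v]: Python list indexing,
-- negative in-range v wraps; out of range — excluded by Pre_ — raises, here junk 0)
def tblB (sub : List (List Int)) : List (List Nat) :=
  sub.map (fun row => row.map (fun v => (PySem.List.pyGet? (List.range sub.length) v).getD 0))

-- eff(node, t, removed) of Source B
def effB (tbl : List (List Nat)) (removed : Option Nat) (node t : Nat) : Nat :=
  let nxt := (tbl.getD node []).getD t 0
  match removed with
  | none => nxt
  | some r =>
      if nxt = r then
        let red := (tbl.getD r []).getD t 0
        if red = r then node else red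
      else nxt

-- frozenset(eff(v, t, removed) for v in S); frozensets of node ids are represented
-- canonically as ordered sublists of range n (exact on Pre_, where every id is < n)
def imgB (n : Nat) (tbl : List (List Nat)) (removed : Option Nat) (t : Nat)
    (S : List Nat) : List Nat :=
  (List.range n).filter (fun j => S.any (fun v => effB tbl removed v t == j))

-- the set comprehension {img(S,t) | S in frontier, t in range(m)}
def levelB (n m : Nat) (tbl : List (List Nat)) (removed : Option Nat)
    (F : List (List Nat)) : PySem.Set (List Nat) :=
  PySem.Set.ofList (F.flatMap (fun S => (List.range m).map (fun t => imgB n tbl removed t S)))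

-- the `for _ in range(n)` loop of synchronizable
def bLoopB (n m : Nat) (tbl : List (List Nat)) (removed : Option Nat) :
    Nat → List (List Nat) → Bool
  | 0, _ => false
  | k + 1, F =>
      let F' := levelB n m tbl removed F
      if F'.any (fun S => S.length == 1) then true else bLoopB n m tbl removed k F'

def syncB (n m : Nat) (tbl : List (List Nat)) (removed : Option Nat) : Bool :=
  bLoopB n m tbl removed n [(List.range n).filter (fun i => !(removed == some i))]

def answerLoopB (n m : Nat) (tbl : List (List Nat)) : List Nat → Int
  | [] => -2
  | i :: rest => if syncB n m tbl (some i) then (i : Int) else answerLoopB n m tbl rest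

def answer_alt (subway : List (List Int)) : Int :=
  let tbl := tblB subway
  if syncB subway.length ((subway.headD []).length) tbl none then -1
  else answerLoopB subway.length ((subway.headD []).length) tbl (List.range subway.length)

-- ===== PRECONDITION & SPEC =====
-- Pre_ excludes: the empty subway (A raises IndexError); target ids outside [-n, n)
-- (IndexError while building); rows shorter than row 0 (usually a KeyError — on rare
-- inputs A dodges the short row and still returns, see the cite).
def Pre_answer (subway : List (List Int)) : Prop :=
  subway ≠ [] ∧ ∀ row ∈ subway, (subway.headD []).length ≤ row.length ∧
    ∀ v ∈ row, -(subway.length : Int) ≤ v ∧ v < (subway.length : Int)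

instance (subway : List (List Int)) : Decidable (Pre_answer subway) := by
  unfold Pre_answer; infer_instance

def pvWitness_answer : List (List Int) := [[1, 0], [0, 1]]

def Spec_answer (subway : List (List Int)) (out : Int) : Prop := out = answer_alt subway
instance (subway : List (List Int)) (out : Int) : Decidable (Spec_answer subway out) := by
  unfold Spec_answer; infer_instance

-- ===== CLAIM (what is proved, stated in full; the proofs are below) =====
def Claim_equal_answer : Prop :=
  ∀ (subway : List (List Int)), Dom_answer subway → Pre_answer subway →
    Spec_answer subway (answer subway)

-- ===== LEMMAS AND PROOFS =====

-- start set / canonical endpoint set of a path (proof-side abbreviations)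
def pvStart (n : Nat) (skip : Option Nat) : List Nat :=
  (List.range n).filter (fun i => !(skip == some i))

def pvT (sub : List (List Int)) (skip : Option Nat) (p : List Nat) : List Nat :=
  (List.range sub.length).filter
    (fun j => (pvStart sub.length skip).any (fun q => tgtA sub skip q p == j))

theorem pv_mem_start {n : Nat} {skip : Option Nat} {q : Nat} :
    q ∈ pvStart n skip ↔ q < n ∧ skip ≠ some q := by
  simp [pvStart]

theorem pv_mem_T {sub : List (List Int)} {skip : Option Nat} {p : List Nat} {j : Nat} :
    j ∈ pvT sub skip p ↔
      j < sub.length ∧ ∃ q ∈ pvStart sub.length skip, tgtA sub skip q p = j := by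
  simp [pvT, List.mem_filter, List.any_eq_true]

theorem pv_mem_tuples {m : Nat} : ∀ {d : Nat} {p : List Nat},
    p ∈ tuplesA m d ↔ p.length = d ∧ ∀ t ∈ p, t < m := by
  intro d
  induction d with
  | zero => intro p; simp [tuplesA, List.length_eq_zero_iff]; rintro rfl; simp
  | succ i ih =>
    intro p
    simp only [tuplesA, List.mem_flatMap, List.mem_map, List.mem_range]
    constructor
    · rintro ⟨q, hq, t, ht, rfl⟩
      rcases ih.mp hq with ⟨hl, hall⟩
      refine ⟨by simp [hl], ?_⟩
      intro x hx
      rcases List.mem_append.mp hx with hx | hx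
      · exact hall x hx
      · simp at hx; omega
    · rintro ⟨hl, hall⟩
      rcases List.eq_nil_or_concat p with rfl | ⟨q, t, rfl⟩
      · simp at hl
      · refine ⟨q, ih.mpr ⟨?_, ?_⟩, t, ?_, by simp⟩
        · simpa using hl
        · intro x hx; exact hall x (by simp [hx])
        · exact hall t (by simp)

-- entries reached under Pre_ are in [-n, n)
theorem pv_entry {sub : List (List Int)} (h : Pre_answer sub) {i t : Nat}
    (hi : i < sub.length) (ht : t < (sub.headD []).length) :
    -(sub.length : Int) ≤ (sub.getD i []).getD t 0 ∧
      (sub.getD i []).getD t 0 < (sub.length : Int) := by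
  have hrowmem : sub.getD i [] ∈ sub := by
    rw [List.getD_eq_getElem sub [] hi]; exact List.getElem_mem hi
  rcases h.2 _ hrowmem with ⟨hlen, hent⟩
  have htl : t < (sub.getD i []).length := lt_of_lt_of_le ht hlen
  have : (sub.getD i []).getD t 0 ∈ sub.getD i [] := by
    rw [List.getD_eq_getElem _ 0 htl]; exact List.getElem_mem htl
  exact hent _ this

theorem pv_resolve_lt {n : Nat} {v : Int} (h1 : -(n : Int) ≤ v)
    (h2 : v < (n : Int)) : pvResolve n v < n := by
  unfold pvResolve
  by_cases hv : v < 0 <;> simp [hv] <;> omega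

theorem pv_pyget {n : Nat} {v : Int} (h1 : -(n : Int) ≤ v) (h2 : v < (n : Int)) :
    (PySem.List.pyGet? (List.range n) v).getD 0 = pvResolve n v := by
  unfold pvResolve
  by_cases hv : 0 ≤ v
  · simp [PySem.List.pyGet?, PySem.List.pyIdx?, hv, h2]
    omega
  · have hv' : v < 0 := by omega
    simp [PySem.List.pyGet?, PySem.List.pyIdx?, hv, h1, List.getElem?_range (by omega : n - (-v).toNat < n)]
    omega

-- the resolved transition table agrees with A's lazy resolution
theorem pv_tbl {sub : List (List Int)} (h : Pre_answer sub) {cur t : Nat}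
    (hcur : cur < sub.length) (ht : t < (sub.headD []).length) :
    ((tblB sub).getD cur []).getD t 0 = pvResolve sub.length ((sub.getD cur []).getD t 0) := by
  have hrowmem : sub.getD cur [] ∈ sub := by
    rw [List.getD_eq_getElem sub [] hcur]; exact List.getElem_mem hcur
  rcases h.2 _ hrowmem with ⟨hlen, _⟩
  have htl : t < (sub.getD cur []).length := lt_of_lt_of_le ht hlen
  have hc1 : cur < (tblB sub).length := by simpa [tblB] using hcur
  rw [List.getD_eq_getElem _ [] hc1]
  have hrow : (tblB sub)[cur] =
      (sub.getD cur []).map (fun v => (PySem.List.pyGet? (List.range sub.length) v).getD 0) := by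
    simp only [tblB, List.getElem_map]
    rw [List.getD_eq_getElem sub [] hcur]
  rw [hrow]
  have htl' : t < ((sub.getD cur []).map
      (fun v => (PySem.List.pyGet? (List.range sub.length) v).getD 0)).length := by
    simpa using htl
  rw [List.getD_eq_getElem _ 0 htl', List.getElem_map, List.getD_eq_getElem _ 0 htl]
  have hb := (h.2 _ hrowmem).2 _ (List.getElem_mem htl)
  exact pv_pyget hb.1 hb.2

-- one step: B's eff equals A's step, and stays in range
theorem pv_step {sub : List (List Int)} (h : Pre_answer sub) {skip : Option Nat}
    (hskip : ∀ s, skip = some s → s < sub.length) {cur t : Nat}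
    (hcur : cur < sub.length) (ht : t < (sub.headD []).length) :
    effB (tblB sub) skip cur t = stepA sub skip cur t ∧ stepA sub skip cur t < sub.length := by
  have e1 := pv_entry h hcur ht
  have r1 := pv_resolve_lt e1.1 e1.2
  cases skip with
  | none =>
    refine ⟨?_, r1⟩
    rw [show effB (tblB sub) none cur t = ((tblB sub).getD cur []).getD t 0 from rfl,
      pv_tbl h hcur ht]
    rfl
  | some s =>
    have hs := hskip s rfl
    have e2 := pv_entry h hs ht
    have r2 := pv_resolve_lt e2.1 e2.2
    simp only [effB, stepA, pv_tbl h hcur ht, pv_tbl h hs ht]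
    split_ifs <;> simp_all

theorem pv_tgt_lt {sub : List (List Int)} (h : Pre_answer sub) {skip : Option Nat}
    (hskip : ∀ s, skip = some s → s < sub.length) {p : List Nat}
    (hp : ∀ t ∈ p, t < (sub.headD []).length) {cur : Nat} (hcur : cur < sub.length) :
    tgtA sub skip cur p < sub.length := by
  induction p generalizing cur with
  | nil => simpa [tgtA] using hcur
  | cons t q ih =>
    have ht : t < (sub.headD []).length := hp t (by simp)
    have := (pv_step h hskip hcur ht).2
    simpa [tgtA] using ih (fun x hx => hp x (by simp [hx])) this

theorem pv_tgt_append {sub : List (List Int)} {skip : Option Nat} {q t : Nat}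
    {p : List Nat} :
    tgtA sub skip q (p ++ [t]) = stepA sub skip (tgtA sub skip q p) t := by
  simp [tgtA, List.foldl_append]

theorem pv_T_nil {sub : List (List Int)} {skip : Option Nat} :
    pvT sub skip [] = pvStart sub.length skip := by
  unfold pvT pvStart
  apply List.filter_congr
  intro j hj
  rw [Bool.eq_iff_iff]
  simp only [List.any_eq_true, beq_iff_eq]
  constructor
  · rintro ⟨q, hq, hqe⟩
    have := pv_mem_start.mp hq
    simp only [tgtA, List.foldl_nil] at hqe
    subst hqe
    simp [this.2]
  · intro hpred
    exact ⟨j, pv_mem_start.mpr ⟨List.mem_range.mp hj, by simpa using hpred⟩, rfl⟩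

theorem pv_img_T {sub : List (List Int)} (h : Pre_answer sub) {skip : Option Nat}
    (hskip : ∀ s, skip = some s → s < sub.length) {p : List Nat}
    (hp : ∀ t ∈ p, t < (sub.headD []).length) {t : Nat}
    (ht : t < (sub.headD []).length) :
    imgB sub.length (tblB sub) skip t (pvT sub skip p) = pvT sub skip (p ++ [t]) := by
  unfold imgB pvT
  apply List.filter_congr
  intro j hj
  rw [Bool.eq_iff_iff]
  simp only [List.any_eq_true, beq_iff_eq]
  constructor
  · rintro ⟨v, hv, hve⟩
    rcases pv_mem_T.mp hv with ⟨hvn, q, hq, rfl⟩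
    have hqn := (pv_mem_start.mp hq).1
    have htgt := pv_tgt_lt h hskip hp hqn
    refine ⟨q, hq, ?_⟩
    rw [pv_tgt_append, ← (pv_step h hskip htgt ht).1]
    exact hve
  · rintro ⟨q, hq, hqe⟩
    have hqn := (pv_mem_start.mp hq).1
    have htgt := pv_tgt_lt h hskip hp hqn
    refine ⟨tgtA sub skip q p, pv_mem_T.mpr ⟨htgt, q, hq, rfl⟩, ?_⟩
    rw [(pv_step h hskip htgt ht).1, ← pv_tgt_append]
    exact hqe

-- A's allSatisy holds exactly when the endpoint set is a singleton
theorem pv_allSat_iff {sub : List (List Int)} (h : Pre_answer sub) {skip : Option Nat}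
    (hskip : ∀ s, skip = some s → s < sub.length)
    (href : (if skip == some 0 then 1 else 0) ∈ pvStart sub.length skip) {p : List Nat}
    (hp : ∀ t ∈ p, t < (sub.headD []).length) :
    allSatA sub skip p = true ↔ (pvT sub skip p).length = 1 := by
  have hrefn := (pv_mem_start.mp href).1
  have hen : tgtA sub skip (if skip == some 0 then 1 else 0) p < sub.length :=
    pv_tgt_lt h hskip hp hrefn
  rw [show allSatA sub skip p = ((List.range sub.length).all
      (fun q => skip == some q ||
        tgtA sub skip q p == tgtA sub skip (if skip == some 0 then 1 else 0) p)) from rfl]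
  generalize (if skip == some 0 then 1 else 0 : Nat) = ref at href hen
  have hsat : ((List.range sub.length).all
      (fun q => skip == some q || tgtA sub skip q p == tgtA sub skip ref p)) = true ↔
      ∀ q ∈ pvStart sub.length skip, tgtA sub skip q p = tgtA sub skip ref p := by
    simp only [List.all_eq_true, List.mem_range, Bool.or_eq_true, beq_iff_eq]
    constructor
    · intro hall q hq
      rcases pv_mem_start.mp hq with ⟨hqn, hqs⟩
      rcases hall q hqn with hc | hc
      · exact absurd hc hqs
      · exact hc
    · intro hall q hqn
      by_cases hqs : skip = some q
      · exact Or.inl hqs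
      · exact Or.inr (hall q (pv_mem_start.mpr ⟨hqn, hqs⟩))
  rw [hsat]
  constructor
  · intro hall
    have hT : pvT sub skip p = [tgtA sub skip ref p] := by
      have h1 : pvT sub skip p = (List.range sub.length).filter
          (fun j => j == tgtA sub skip ref p) := by
        unfold pvT
        apply List.filter_congr
        intro j hj
        rw [Bool.eq_iff_iff]
        simp only [List.any_eq_true, beq_iff_eq]
        constructor
        · rintro ⟨q, hq, rfl⟩; exact hall q hq
        · rintro rfl; exact ⟨_, href, rfl⟩
      rw [h1, List.filter_beq,
        List.count_eq_one_of_mem List.nodup_range (List.mem_range.mpr hen)]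
      simp
    simp [hT]
  · intro hlen q hq
    rcases List.length_eq_one_iff.mp hlen with ⟨c, hc⟩
    have hqn := (pv_mem_start.mp hq).1
    have h1 : tgtA sub skip q p ∈ pvT sub skip p :=
      pv_mem_T.mpr ⟨pv_tgt_lt h hskip hp hqn, q, hq, rfl⟩
    have h2 : tgtA sub skip ref p ∈ pvT sub skip p :=
      pv_mem_T.mpr ⟨hen, _, href, rfl⟩
    rw [hc] at h1 h2
    simp at h1 h2
    rw [h1, h2]

-- frontier invariant is preserved by one BFS level
theorem pv_level_inv {sub : List (List Int)} (h : Pre_answer sub) {skip : Option Nat}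
    (hskip : ∀ s, skip = some s → s < sub.length) {d : Nat} {F : List (List Nat)}
    (hF : ∀ S, S ∈ F ↔ ∃ p ∈ tuplesA ((sub.headD []).length) d, S = pvT sub skip p) :
    ∀ S, S ∈ levelB sub.length ((sub.headD []).length) (tblB sub) skip F ↔
      ∃ p ∈ tuplesA ((sub.headD []).length) (d + 1), S = pvT sub skip p := by
  intro S
  unfold levelB
  rw [PySem.Set.mem_ofList]
  simp only [List.mem_flatMap, List.mem_map, List.mem_range]
  constructor
  · rintro ⟨S', hS', t, ht, rfl⟩
    rcases (hF S').mp hS' with ⟨p, hp, rfl⟩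
    rcases pv_mem_tuples.mp hp with ⟨hl, hall⟩
    refine ⟨p ++ [t], pv_mem_tuples.mpr ⟨by simp [hl], ?_⟩,
      pv_img_T h hskip hall ht⟩

    intro x hx
    rcases List.mem_append.mp hx with hx | hx
    · exact hall x hx
    · simp at hx; omega
  · rintro ⟨p', hp', rfl⟩
    rcases pv_mem_tuples.mp hp' with ⟨hl, hall⟩
    rcases List.eq_nil_or_concat p' with rfl | ⟨p, t, rfl⟩
    · simp at hl
    · simp only [List.concat_eq_append] at hl hall ⊢
      have hallp : ∀ x ∈ p, x < (sub.headD []).length :=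
          fun x hx => hall x (by simp [hx])
      have ht : t < (sub.headD []).length := hall t (by simp)
      refine ⟨pvT sub skip p, (hF _).mpr ⟨p, pv_mem_tuples.mpr ⟨by simpa using hl, hallp⟩,
        rfl⟩, t, ht, pv_img_T h hskip hallp ht⟩

-- B's per-level singleton check equals A's per-length path check
theorem pv_check {sub : List (List Int)} (h : Pre_answer sub) {skip : Option Nat}
    (hskip : ∀ s, skip = some s → s < sub.length)
    (href : (if skip == some 0 then 1 else 0) ∈ pvStart sub.length skip)
    {d : Nat} {F : List (List Nat)}
    (hF : ∀ S, S ∈ F ↔ ∃ p ∈ tuplesA ((sub.headD []).length) d, S = pvT sub skip p) :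
    (F.any (fun S => S.length == 1)) =
      (tuplesA ((sub.headD []).length) d).any (allSatA sub skip) := by
  rw [Bool.eq_iff_iff]
  simp only [List.any_eq_true, beq_iff_eq]
  constructor
  · rintro ⟨S, hS, hlen⟩
    rcases (hF S).mp hS with ⟨p, hp, rfl⟩
    exact ⟨p, hp, (pv_allSat_iff h hskip href (pv_mem_tuples.mp hp).2).mpr hlen⟩
  · rintro ⟨p, hp, hsat⟩
    exact ⟨pvT sub skip p, (hF _).mpr ⟨p, hp, rfl⟩,
      (pv_allSat_iff h hskip href (pv_mem_tuples.mp hp).2).mp hsat⟩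

theorem pv_loop {sub : List (List Int)} (h : Pre_answer sub) {skip : Option Nat}
    (hskip : ∀ s, skip = some s → s < sub.length)
    (href : (if skip == some 0 then 1 else 0) ∈ pvStart sub.length skip) :
    ∀ (k d : Nat) (F : List (List Nat)),
      (∀ S, S ∈ F ↔ ∃ p ∈ tuplesA ((sub.headD []).length) d, S = pvT sub skip p) →
      (bLoopB sub.length ((sub.headD []).length) (tblB sub) skip k F = true ↔ ∃ i, i < k ∧
        (tuplesA ((sub.headD []).length) (d + i + 1)).any (allSatA sub skip) = true) := by
  intro k
  induction k with
  | zero => intro d F _; simp [bLoopB]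
  | succ k ih =>
    intro d F hF
    have hF' := pv_level_inv h hskip hF
    have hstep : bLoopB sub.length ((sub.headD []).length) (tblB sub) skip (k + 1) F =
        if (levelB sub.length ((sub.headD []).length) (tblB sub) skip F).any (fun S => S.length == 1) then true
        else bLoopB sub.length ((sub.headD []).length) (tblB sub) skip k (levelB sub.length ((sub.headD []).length) (tblB sub) skip F) := rfl
    rw [hstep, pv_check h hskip href hF']
    by_cases hc : (tuplesA ((sub.headD []).length) (d + 1)).any (allSatA sub skip) = true
    · rw [if_pos hc]
      exact ⟨fun _ => ⟨0, by omega, by simpa using hc⟩, fun _ => rfl⟩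
    · rw [if_neg hc, ih (d + 1) _ hF']
      constructor
      · rintro ⟨i, hi, hp⟩
        refine ⟨i + 1, by omega, ?_⟩
        rw [show d + (i + 1) + 1 = d + 1 + i + 1 from by omega]
        exact hp
      · rintro ⟨i, hi, hp⟩
        cases i with
        | zero => exact absurd (by simpa using hp) hc
        | succ j =>
          refine ⟨j, by omega, ?_⟩
          rw [show d + 1 + j + 1 = d + (j + 1) + 1 from by omega]
          exact hp

theorem pv_main (sub : List (List Int)) (h : Pre_answer sub) (skip : Option Nat)
    (hs : skip = none ∨ ∃ s, skip = some s ∧ s < sub.length ∧ 2 ≤ sub.length) :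
    pathPossibleA sub skip = syncB sub.length ((sub.headD []).length) (tblB sub) skip := by
  have hn : 0 < sub.length := by
    rcases sub with _ | _
    · exact absurd rfl h.1
    · simp
  have hskip : ∀ s, skip = some s → s < sub.length := by
    intro s hs2
    rcases hs with hnone | ⟨s', hs', hlt, _⟩
    · rw [hnone] at hs2; cases hs2
    · rw [hs'] at hs2; injection hs2 with h2; omega
  have href : (if skip == some 0 then 1 else 0) ∈ pvStart sub.length skip := by
    rcases hs with rfl | ⟨s, rfl, hlt, hn2⟩
    · refine pv_mem_start.mpr ⟨?_, ?_⟩ <;> simp [hn]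
    · by_cases hs0 : s = 0
      · subst hs0
        rw [show ((some 0 : Option Nat) == some 0) = true from by simp, if_pos rfl]
        exact pv_mem_start.mpr ⟨by omega, by simp⟩
      · rw [show ((some s : Option Nat) == some 0) = false from by simp [hs0]]
        simp only [Bool.false_eq_true, if_false]
        exact pv_mem_start.mpr ⟨by omega, by simp [hs0]⟩
  have hstart : ∀ S, S ∈ [(List.range sub.length).filter (fun i => !(skip == some i))] ↔
      ∃ p ∈ tuplesA ((sub.headD []).length) 0, S = pvT sub skip p := by
    intro S
    simp [tuplesA, pv_T_nil, pvStart]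
  rw [Bool.eq_iff_iff]
  have hA : pathPossibleA sub skip = true ↔ ∃ i, i < sub.length ∧
      (tuplesA ((sub.headD []).length) (i + 1)).any (allSatA sub skip) = true := by
    simp [pathPossibleA]
  rw [hA, show syncB sub.length ((sub.headD []).length) (tblB sub) skip = bLoopB sub.length ((sub.headD []).length) (tblB sub) skip sub.length
      [(List.range sub.length).filter (fun i => !(skip == some i))] from rfl,
    pv_loop h hskip href sub.length 0 _ hstart]
  constructor
  · rintro ⟨i, hi, hp⟩
    refine ⟨i, hi, ?_⟩
    rw [show 0 + i + 1 = i + 1 from by omega]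
    exact hp
  · rintro ⟨i, hi, hp⟩
    rw [show 0 + i + 1 = i + 1 from by omega] at hp
    exact ⟨i, hi, hp⟩

theorem pv_tuples_m0 (i : Nat) : tuplesA 0 (i + 1) = [] := by
  simp [tuplesA]

theorem pv_m0_A (sub : List (List Int)) (hm : (sub.headD []).length = 0)
    (skip : Option Nat) : pathPossibleA sub skip = false := by
  simp only [pathPossibleA, hm, pv_tuples_m0, List.any_nil]
  simp

theorem pv_m0_B (sub : List (List Int)) (hm : (sub.headD []).length = 0)
    (skip : Option Nat) : syncB sub.length ((sub.headD []).length) (tblB sub) skip = false := by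
  have hlevel : ∀ F : List (List Nat), levelB sub.length ((sub.headD []).length) (tblB sub) skip F = [] := by
    intro F
    have h1 : F.flatMap
        (fun S => (List.range ((sub.headD []).length)).map (fun t => imgB sub.length (tblB sub) skip t S)) = [] := by
      simp only [hm, List.range_zero, List.map_nil]
      simp
    rw [levelB, h1]
    rfl
  have hall : ∀ (k : Nat) (F : List (List Nat)), bLoopB sub.length ((sub.headD []).length) (tblB sub) skip k F = false := by
    intro k
    induction k with
    | zero => intro F; rfl
    | succ k ih =>
      intro F
      have hstep : bLoopB sub.length ((sub.headD []).length) (tblB sub) skip (k + 1) F =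
          if (levelB sub.length ((sub.headD []).length) (tblB sub) skip F).any (fun S => S.length == 1) then true
          else bLoopB sub.length ((sub.headD []).length) (tblB sub) skip k (levelB sub.length ((sub.headD []).length) (tblB sub) skip F) := rfl
      rw [hstep, hlevel]
      simpa using ih _
  exact hall _ _

theorem pv_n1 {sub : List (List Int)} (hn1 : sub.length = 1)
    (hm : (sub.headD []).length ≠ 0) : pathPossibleA sub none = true := by
  simp only [pathPossibleA, List.any_eq_true]
  refine ⟨0, by simp [hn1], [0], ?_, ?_⟩
  · exact pv_mem_tuples.mpr ⟨rfl, by intro t ht; simp at ht; omega⟩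
  · simp [allSatA, hn1]

-- ===== VERDICT (by name: the statement is the Claim_ definition above) =====
theorem answer_spec : Claim_equal_answer := by
  intro sub _ h
  unfold Spec_answer
  by_cases hm : (sub.headD []).length = 0
  · have hloops : ∀ L, answerLoopA sub L = answerLoopB sub.length ((sub.headD []).length) (tblB sub) L := by
      intro L
      induction L with
      | nil => rfl
      | cons i rest ih =>
        have hA := pv_m0_A sub hm (some i)
        have hB := pv_m0_B sub hm (some i)
        simp only [answerLoopA, answerLoopB, hA, hB]
        simp [ih]
    have halt : answer_alt sub =
        if syncB sub.length ((sub.headD []).length) (tblB sub) none then (-1 : Int)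
        else answerLoopB sub.length ((sub.headD []).length) (tblB sub)
          (List.range sub.length) := rfl
    rw [answer, halt, pv_m0_A sub hm none, pv_m0_B sub hm none]
    simpa using hloops _
  · have h0 := pv_main sub h none (Or.inl rfl)
    have halt : answer_alt sub =
        if syncB sub.length ((sub.headD []).length) (tblB sub) none then (-1 : Int)
        else answerLoopB sub.length ((sub.headD []).length) (tblB sub)
          (List.range sub.length) := rfl
    rw [answer, halt, ← h0]
    by_cases hp : pathPossibleA sub none = true
    · rw [if_pos hp, if_pos hp]
    · have hn2 : 2 ≤ sub.length := by
        have hn : 0 < sub.length := by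
          rcases sub with _ | _
          · exact absurd rfl h.1
          · simp
        by_contra hlt
        have hn1 : sub.length = 1 := by omega
        exact hp (pv_n1 hn1 hm)
      rw [if_neg hp, if_neg hp]
      have hloops : ∀ L, (∀ i ∈ L, i < sub.length) →
          answerLoopA sub L = answerLoopB sub.length ((sub.headD []).length) (tblB sub) L := by
        intro L
        induction L with
        | nil => intro _; rfl
        | cons i rest ih =>
          intro hL
          have hi : i < sub.length := hL i (by simp)
          have hmain := pv_main sub h (some i) (Or.inr ⟨i, rfl, hi, hn2⟩)
          simp only [answerLoopA, answerLoopB, ← hmain, ih (fun x hx => hL x (by simp [hx]))]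
      exact hloops _ (fun i hi => List.mem_range.mp hi)
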